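-- pv_equiv track=rewrite | github.com/Lang7910/lottery | backend/services/metaphysical_service.py | zodiac_to_numbers
-- ===== SOURCE A (Python) =====
-- from typing import List, Dict, Tuple, Set, Optional
--
-- HK6_YEAR_ZODIAC = {
--     2024: 4,  # 龙
--     2025: 5,  # 蛇
--     2026: 6,  # 马
--     2027: 7,  # 羊
--     2028: 8,  # 猴
--     2029: 9,  # 鸡
--     2030: 10, # 狗
-- }
--
-- def get_hk6_year_zodiac_idx(lunar_year: int) -> int:
--     """获取农历年对应的生肖索引"""
--     if lunar_year in HK6_YEAR_ZODIAC:
--         return HK6_YEAR_ZODIAC[lunar_year]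
--     # 计算
--     base_year = 2024
--     base_zodiac = 4  # 龙
--     return (base_zodiac + (lunar_year - base_year)) % 12
--
-- def zodiac_to_numbers(zodiac_idx: int, lunar_year: int) -> List[int]:
--     """将生肖转换为当年对应的号码列表"""
--     year_zodiac_idx = get_hk6_year_zodiac_idx(lunar_year)
--     numbers = []
--     for num in range(1, 50):
--         num_offset = (num - 1) % 12
--         num_zodiac_idx = (year_zodiac_idx - num_offset + 12) % 12
--         if num_zodiac_idx == zodiac_idx:
--             numbers.append(num)
--     return numbers
-- ===== SOURCE B (Python) =====
-- from typing import List
--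
-- HK6_YEAR_ZODIAC = {
--     2024: 4,  # dragon
--     2025: 5,
--     2026: 6,
--     2027: 7,
--     2028: 8,
--     2029: 9,
--     2030: 10,
-- }
--
-- def zodiac_to_numbers(zodiac_idx: int, lunar_year: int) -> List[int]:
--     year_zodiac_idx = HK6_YEAR_ZODIAC.get(lunar_year, (4 + (lunar_year - 2024)) % 12)
--     if not (0 <= zodiac_idx < 12):
--         return []
--     # numbers with (num - 1) % 12 == (year_zodiac_idx - zodiac_idx) % 12, in one stride
--     return list(range((year_zodiac_idx - zodiac_idx) % 12 + 1, 50, 12))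
-- ===== Notes on version B (the rewrite author's own statement) =====
-- stated objective: simpler
-- what changed: Instead of scanning all 49 numbers and testing each one's zodiac, B computes the single residue class (year_zodiac_idx - zodiac_idx) % 12 and emits the arithmetic progression range(target+1, 50, 12) directly (empty when zodiac_idx is outside 0..11).
import Mathlib
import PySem

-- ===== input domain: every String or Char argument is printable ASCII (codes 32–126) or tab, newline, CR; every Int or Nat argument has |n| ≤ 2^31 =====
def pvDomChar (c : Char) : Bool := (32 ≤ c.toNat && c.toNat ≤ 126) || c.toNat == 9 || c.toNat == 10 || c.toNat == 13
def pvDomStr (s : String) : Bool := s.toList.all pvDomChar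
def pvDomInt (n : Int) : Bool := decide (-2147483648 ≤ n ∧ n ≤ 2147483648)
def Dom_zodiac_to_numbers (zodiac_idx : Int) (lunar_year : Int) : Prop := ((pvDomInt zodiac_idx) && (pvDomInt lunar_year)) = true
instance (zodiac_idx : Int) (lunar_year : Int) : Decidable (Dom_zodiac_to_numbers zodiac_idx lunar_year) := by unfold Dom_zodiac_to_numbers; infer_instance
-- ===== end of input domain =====

-- B replaces A's scan of all 49 numbers (testing each number's zodiac) by emitting the single
-- arithmetic progression range((year_zodiac_idx - zodiac_idx) % 12 + 1, 50, 12) directly (simpler).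


-- ===== PORT A =====
-- module constant HK6_YEAR_ZODIAC (dict, insertion order)
def HK6_YEAR_ZODIAC : PySem.Dict Int Int :=
  PySem.Dict.ofList [(2024, 4), (2025, 5), (2026, 6), (2027, 7), (2028, 8), (2029, 9), (2030, 10)]

def get_hk6_year_zodiac_idx (lunar_year : Int) : Int :=
  match HK6_YEAR_ZODIAC.get? lunar_year with
  | some v => v
  | none => PySem.Int.mod (4 + (lunar_year - 2024)) 12

def zodiac_to_numbers (zodiac_idx : Int) (lunar_year : Int) : List Int :=
  let year_zodiac_idx := get_hk6_year_zodiac_idx lunar_year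
  (PySem.List.pyRange 1 50 1).foldl
    (fun numbers num =>
      let num_offset := PySem.Int.mod (num - 1) 12
      let num_zodiac_idx := PySem.Int.mod (year_zodiac_idx - num_offset + 12) 12
      if num_zodiac_idx = zodiac_idx then numbers ++ [num] else numbers)
    []

-- ===== PORT B =====
def get_hk6_year_zodiac_idx_alt (lunar_year : Int) : Int :=
  (HK6_YEAR_ZODIAC.get? lunar_year).getD (PySem.Int.mod (4 + (lunar_year - 2024)) 12)

def zodiac_to_numbers_alt (zodiac_idx : Int) (lunar_year : Int) : List Int :=
  let year_zodiac_idx := get_hk6_year_zodiac_idx_alt lunar_year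
  if 0 ≤ zodiac_idx ∧ zodiac_idx < 12 then
    PySem.List.pyRange (PySem.Int.mod (year_zodiac_idx - zodiac_idx) 12 + 1) 50 12
  else
    []

-- ===== PRECONDITION & SPEC =====
def Spec_zodiac_to_numbers (zodiac_idx : Int) (lunar_year : Int) (out : List Int) : Prop := out = zodiac_to_numbers_alt zodiac_idx lunar_year
instance (zodiac_idx : Int) (lunar_year : Int) (out : List Int) : Decidable (Spec_zodiac_to_numbers zodiac_idx lunar_year out) := by unfold Spec_zodiac_to_numbers; infer_instance

-- ===== CLAIM (what is proved, stated in full; the proofs are below) =====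
def Claim_equal_zodiac_to_numbers : Prop := ∀ (zodiac_idx : Int) (lunar_year : Int), Dom_zodiac_to_numbers zodiac_idx lunar_year → Spec_zodiac_to_numbers zodiac_idx lunar_year (zodiac_to_numbers zodiac_idx lunar_year)

-- ===== LEMMAS AND PROOFS =====

-- the two year-zodiac helpers agree (match vs Option.getD)
theorem year_idx_alt_eq (lunar_year : Int) :
    get_hk6_year_zodiac_idx_alt lunar_year = get_hk6_year_zodiac_idx lunar_year := by
  unfold get_hk6_year_zodiac_idx_alt get_hk6_year_zodiac_idx
  cases HK6_YEAR_ZODIAC.get? lunar_year <;> rfl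

-- the year zodiac index is always in 0..11
theorem year_idx_bounds (lunar_year : Int) :
    0 ≤ get_hk6_year_zodiac_idx lunar_year ∧ get_hk6_year_zodiac_idx lunar_year < 12 := by
  unfold get_hk6_year_zodiac_idx
  rcases h : HK6_YEAR_ZODIAC.get? lunar_year with _ | v
  · exact ⟨PySem.Int.mod_nonneg _ (by norm_num), PySem.Int.mod_lt _ (by norm_num)⟩
  · show 0 ≤ v ∧ v < 12
    simp [HK6_YEAR_ZODIAC, PySem.Dict.ofList, PySem.Dict.update, PySem.Dict.insert,
      PySem.Dict.empty, PySem.Dict.get?] at h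
    obtain ⟨a, h⟩ := h
    omega

-- core: for any year zodiac index y in 0..11, A's scan equals B's progression
theorem scan_eq_progression (y z : Int) (hy0 : 0 ≤ y) (hy : y < 12) :
    (PySem.List.pyRange 1 50 1).foldl
      (fun numbers num =>
        if PySem.Int.mod (y - PySem.Int.mod (num - 1) 12 + 12) 12 = z then numbers ++ [num] else numbers)
      [] =
    (if 0 ≤ z ∧ z < 12 then PySem.List.pyRange (PySem.Int.mod (y - z) 12 + 1) 50 12 else []) := by
  by_cases hz : 0 ≤ z ∧ z < 12
  · rw [if_pos hz]
    obtain ⟨hz0, hz1⟩ := hz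
    interval_cases y <;> interval_cases z <;> decide
  · rw [if_neg hz]
    have key : ∀ num : Int,
        (if PySem.Int.mod (y - PySem.Int.mod (num - 1) 12 + 12) 12 = z then (· ++ [num]) else id) = id := by
      intro num
      rw [if_neg]
      intro h
      have h1 := PySem.Int.mod_nonneg (y - PySem.Int.mod (num - 1) 12 + 12) (show (0:Int) < 12 by norm_num)
      have h2 := PySem.Int.mod_lt (y - PySem.Int.mod (num - 1) 12 + 12) (show (0:Int) < 12 by norm_num)
      rw [h] at h1 h2
      exact hz ⟨h1, h2⟩
    induction PySem.List.pyRange 1 50 1 with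
    | nil => rfl
    | cons a l ih =>
      simp only [List.foldl_cons]
      have := key a
      by_cases hc : PySem.Int.mod (y - PySem.Int.mod (a - 1) 12 + 12) 12 = z
      · exfalso
        have h1 := PySem.Int.mod_nonneg (y - PySem.Int.mod (a - 1) 12 + 12) (show (0:Int) < 12 by norm_num)
        have h2 := PySem.Int.mod_lt (y - PySem.Int.mod (a - 1) 12 + 12) (show (0:Int) < 12 by norm_num)
        rw [hc] at h1 h2
        exact hz ⟨h1, h2⟩
      · rw [if_neg hc]; exact ih

-- ===== VERDICT (by name: the statement is the Claim_ definition above) =====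
theorem zodiac_to_numbers_spec : Claim_equal_zodiac_to_numbers := by
  intro zodiac_idx lunar_year _
  show zodiac_to_numbers zodiac_idx lunar_year = zodiac_to_numbers_alt zodiac_idx lunar_year
  unfold zodiac_to_numbers zodiac_to_numbers_alt
  rw [year_idx_alt_eq]
  obtain ⟨h0, h1⟩ := year_idx_bounds lunar_year
  exact scan_eq_progression _ zodiac_idx h0 h1
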